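-- pv_equiv track=rewrite | github.com/sublime-security/technical-solutions-temp | sublime-migration-cli/src/sublime_migration_cli/utils/filtering.py | filter_by_ids
-- ===== SOURCE A (Python) =====
-- from typing import Any, Callable, Dict, List, Optional, Set, Union
--
-- def filter_by_ids(items: List[Dict],
--                  include_ids: Optional[str] = None,
--                  exclude_ids: Optional[str] = None,
--                  id_field: str = "id") -> List[Dict]:
--     """
--     Filter a list of items by ID.
--
--     Args:
--         items: List of items to filter
--         include_ids: Comma-separated list of IDs to include
--         exclude_ids: Comma-separated list of IDs to exclude
--         id_field: Field name containing the ID in each item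
--
--     Returns:
--         List[Dict]: Filtered items
--     """
--     filtered = items
--
--     # Filter by included IDs if specified
--     if include_ids:
--         ids = set(id.strip() for id in include_ids.split(","))
--         filtered = [item for item in filtered if item.get(id_field) in ids]
--
--     # Filter by excluded IDs if specified
--     if exclude_ids:
--         ids = set(id.strip() for id in exclude_ids.split(","))
--         filtered = [item for item in filtered if item.get(id_field) not in ids]
--
--     return filtered
-- ===== SOURCE B (Python) =====
-- def filter_by_ids(items, include_ids=None, exclude_ids=None, id_field="id"):
--     # Compute the allowed key set by set algebra on the distinct keys, then one membership filter.
--     allowed = {item.get(id_field) for item in items}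
--     if include_ids:
--         allowed &= {s.strip() for s in include_ids.split(",")}
--     if exclude_ids:
--         allowed -= {s.strip() for s in exclude_ids.split(",")}
--     return [item for item in items if item.get(id_field) in allowed]
-- ===== Notes on version B (the rewrite author's own statement) =====
-- stated objective: alternative
-- what changed: B replaces A's two staged per-item filter passes with set algebra: it collects the distinct keys once, intersects with the include set and subtracts the exclude set, then keeps items by a single membership test in the resulting allowed-key set (membership decided once per distinct key, not per item).
import Mathlib
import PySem

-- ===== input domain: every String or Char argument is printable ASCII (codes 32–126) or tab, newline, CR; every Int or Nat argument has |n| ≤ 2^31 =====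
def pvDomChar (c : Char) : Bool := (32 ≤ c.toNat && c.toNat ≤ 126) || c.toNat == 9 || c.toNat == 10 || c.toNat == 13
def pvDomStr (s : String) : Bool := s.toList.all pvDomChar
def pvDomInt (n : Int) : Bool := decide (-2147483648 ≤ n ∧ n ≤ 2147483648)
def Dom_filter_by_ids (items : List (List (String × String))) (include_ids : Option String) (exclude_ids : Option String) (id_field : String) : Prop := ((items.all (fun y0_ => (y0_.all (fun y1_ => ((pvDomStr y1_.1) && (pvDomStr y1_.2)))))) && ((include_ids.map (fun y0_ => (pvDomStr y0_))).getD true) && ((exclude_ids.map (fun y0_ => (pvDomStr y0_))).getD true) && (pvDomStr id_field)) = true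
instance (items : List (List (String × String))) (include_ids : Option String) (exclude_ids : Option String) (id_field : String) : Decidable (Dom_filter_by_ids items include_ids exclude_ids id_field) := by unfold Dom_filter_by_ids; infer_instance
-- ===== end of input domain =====

-- B computes the allowed key set once by set algebra (distinct keys ∩ include-set, minus exclude-set) and then does a single
-- membership filter, instead of A's two staged per-item filter passes (alternative decomposition, same asymptotic cost;
-- return value only — neither program mutates its arguments).

-- ===== PORT A =====
def filter_by_ids (items : List (List (String × String))) (include_ids : Option String) (exclude_ids : Option String) (id_field : String) : List (List (String × String)) :=
  let filtered := items
  -- if include_ids: (truthy = some non-empty string)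
  let filtered :=
    match include_ids with
    | some s =>
        if s ≠ "" then
          let ids : PySem.Set String := PySem.Set.ofList (((PySem.Str.split? s ",").getD []).map PySem.Str.strip)
          filtered.filter (fun item =>
            match (PySem.Dict.mk item).get? id_field with
            | some v => ids.contains v
            | none => false)
        else filtered
    | none => filtered
  -- if exclude_ids:
  match exclude_ids with
  | some s =>
      if s ≠ "" then
        let ids : PySem.Set String := PySem.Set.ofList (((PySem.Str.split? s ",").getD []).map PySem.Str.strip)
        filtered.filter (fun item =>
          match (PySem.Dict.mk item).get? id_field with
          | some v => !ids.contains v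
          | none => true)
      else filtered
  | none => filtered

-- ===== PORT B =====
-- item.get(id_field): Option String (none = key absent, Python None)
def pvKey (id_field : String) (item : List (String × String)) : Option String :=
  (PySem.Dict.mk item).get? id_field

-- Python's {s.strip() for s in csv.split(",")} as a set of Option String: each string s is embedded as `some s`.
-- This embedding is exact: Python's None equals no string, and `none` equals no `some s`.
def pvCsvSet (s : String) : PySem.Set (Option String) :=
  PySem.Set.ofList ((((PySem.Str.split? s ",").getD []).map PySem.Str.strip).map some)

def filter_by_ids_alt (items : List (List (String × String))) (include_ids : Option String) (exclude_ids : Option String) (id_field : String) : List (List (String × String)) :=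
  -- allowed = {item.get(id_field) for item in items}
  let allowed : PySem.Set (Option String) := PySem.Set.ofList (items.map (pvKey id_field))
  -- if include_ids: allowed &= {…}
  let allowed :=
    match include_ids with
    | some s => if s ≠ "" then PySem.Set.inter allowed (pvCsvSet s) else allowed
    | none => allowed
  -- if exclude_ids: allowed -= {…}
  let allowed :=
    match exclude_ids with
    | some s => if s ≠ "" then PySem.Set.diff allowed (pvCsvSet s) else allowed
    | none => allowed
  -- final single membership filter
  items.filter (fun item => allowed.contains (pvKey id_field item))

-- ===== PRECONDITION & SPEC =====
def Spec_filter_by_ids (items : List (List (String × String))) (include_ids : Option String) (exclude_ids : Option String) (id_field : String) (out : List (List (String × String))) : Prop := out = filter_by_ids_alt items include_ids exclude_ids id_field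
instance (items : List (List (String × String))) (include_ids : Option String) (exclude_ids : Option String) (id_field : String) (out : List (List (String × String))) : Decidable (Spec_filter_by_ids items include_ids exclude_ids id_field out) := by unfold Spec_filter_by_ids; infer_instance

-- ===== CLAIM (what is proved, stated in full; the proofs are below) =====
def Claim_equal_filter_by_ids : Prop := ∀ (items : List (List (String × String))) (include_ids : Option String) (exclude_ids : Option String) (id_field : String), Dom_filter_by_ids items include_ids exclude_ids id_field → Spec_filter_by_ids items include_ids exclude_ids id_field (filter_by_ids items include_ids exclude_ids id_field)

-- ===== LEMMAS AND PROOFS =====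

-- contains on a filtered set is contains-and-condition
theorem contains_filter_set {α : Type} [BEq α] [LawfulBEq α] (s : PySem.Set α) (p : α → Bool) (x : α) :
    PySem.Set.contains (List.filter p s) x = (PySem.Set.contains s x && p x) := by
  by_cases h : p x <;>
    simp [PySem.Set.contains, List.contains_eq_mem, List.mem_filter, h]

theorem contains_ofList {α : Type} [BEq α] [LawfulBEq α] (l : List α) (x : α) :
    PySem.Set.contains (PySem.Set.ofList l) x = decide (x ∈ l) := by
  simp [PySem.Set.contains, List.contains_eq_mem, PySem.Set.mem_ofList]

-- membership of a key in the embedded CSV set equals A's per-item test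
theorem contains_csv (s : String) (k : Option String) :
    PySem.Set.contains (pvCsvSet s) k =
      (match k with
       | some v => PySem.Set.contains (PySem.Set.ofList (((PySem.Str.split? s ",").getD []).map PySem.Str.strip)) v
       | none => false) := by
  cases k with
  | none => simp [pvCsvSet]
  | some v => simp [pvCsvSet]

theorem key_mem_keys (items : List (List (String × String))) (id_field : String)
    (item : List (String × String)) (h : item ∈ items) :
    PySem.Set.contains (PySem.Set.ofList (items.map (pvKey id_field))) (pvKey id_field item) = true := by
  rw [contains_ofList]
  simp only [decide_eq_true_eq]
  exact List.mem_map_of_mem h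

-- ===== VERDICT (by name: the statement is the Claim_ definition above) =====
theorem filter_by_ids_spec : Claim_equal_filter_by_ids := by
  intro items include_ids exclude_ids id_field _
  unfold Spec_filter_by_ids filter_by_ids filter_by_ids_alt
  cases include_ids with
  | none =>
    cases exclude_ids with
    | none =>
      symm
      apply List.filter_eq_self.mpr
      intro item h
      exact key_mem_keys items id_field item h
    | some e =>
      by_cases he : e = ""
      · simp only [he, ne_eq, not_true_eq_false, if_false]
        symm
        apply List.filter_eq_self.mpr
        intro item h
        exact key_mem_keys items id_field item h
      · simp only [he, ne_eq, not_false_eq_true, if_true, PySem.Set.diff]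
        apply List.filter_congr
        intro item h
        rw [contains_filter_set, key_mem_keys items id_field item h, Bool.true_and, contains_csv]
        cases hk : (PySem.Dict.mk item).get? id_field <;> simp [pvKey, hk]
  | some i =>
    by_cases hi : i = ""
    · simp only [hi, ne_eq, not_true_eq_false, if_false]
      cases exclude_ids with
      | none =>
        symm
        apply List.filter_eq_self.mpr
        intro item h
        exact key_mem_keys items id_field item h
      | some e =>
        by_cases he : e = ""
        · simp only [he, not_true_eq_false, if_false]
          symm
          apply List.filter_eq_self.mpr
          intro item h
          exact key_mem_keys items id_field item h
        · simp only [he, not_false_eq_true, if_true, PySem.Set.diff]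
          apply List.filter_congr
          intro item h
          rw [contains_filter_set, key_mem_keys items id_field item h, Bool.true_and, contains_csv]
          cases hk : (PySem.Dict.mk item).get? id_field <;> simp [pvKey, hk]
    · simp only [hi, ne_eq, not_false_eq_true, if_true, PySem.Set.inter, PySem.Set.diff]
      cases exclude_ids with
      | none =>
        apply List.filter_congr
        intro item h
        rw [contains_filter_set, key_mem_keys items id_field item h, Bool.true_and, contains_csv]
        cases hk : (PySem.Dict.mk item).get? id_field <;> simp [pvKey, hk]
      | some e =>
        by_cases he : e = ""
        · simp only [he, not_true_eq_false, if_false]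
          apply List.filter_congr
          intro item h
          rw [contains_filter_set, key_mem_keys items id_field item h, Bool.true_and, contains_csv]
          cases hk : (PySem.Dict.mk item).get? id_field <;> simp [pvKey, hk]
        · simp only [he, not_false_eq_true, if_true]
          rw [List.filter_filter]
          apply List.filter_congr
          intro item h
          rw [contains_filter_set, contains_filter_set, key_mem_keys items id_field item h,
            Bool.true_and, contains_csv, contains_csv]
          cases hk : (PySem.Dict.mk item).get? id_field <;> simp [pvKey, hk, Bool.and_comm]
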